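-- pv_equiv track=rewrite | github.com/YOUNESS-RZIQI/Python_Deep__Dive | Python_Modules/Python_03/ex4/ft_inventory_system.py | categorize_items
-- ===== SOURCE A (Python) =====
-- def categorize_items(inventory: dict[str, int]) -> dict[str, dict[str, int]]:
--
--     """
--     Categorize items into nested dictionaries by abundance.
--     """
--
--     categories: dict[str, dict[str, int]] = {
--         "abundant": {},
--         "moderate": {},
--         "scarce": {}
--     }
--
--     for item, qty in inventory.items():
--         if qty >= 10:
--             categories["abundant"][item] = qty
--         elif qty >= 5:
--             categories["moderate"][item] = qty
--         else:
--             categories["scarce"][item] = qty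
--
--     return categories
-- ===== SOURCE B (Python) =====
-- def categorize_items(inventory: dict[str, int]) -> dict[str, dict[str, int]]:
--     """Categorize items into nested dictionaries by abundance."""
--     return {
--         "abundant": {item: qty for item, qty in inventory.items() if qty >= 10},
--         "moderate": {item: qty for item, qty in inventory.items() if 5 <= qty < 10},
--         "scarce": {item: qty for item, qty in inventory.items() if qty < 5},
--     }
-- ===== Notes on version B (the rewrite author's own statement) =====
-- stated objective: simpler
-- what changed: Replaces the single-pass if/elif/else accumulation into a pre-built nested dict by a dict literal of three independent filtering comprehensions, one scan per band.
import Mathlib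
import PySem

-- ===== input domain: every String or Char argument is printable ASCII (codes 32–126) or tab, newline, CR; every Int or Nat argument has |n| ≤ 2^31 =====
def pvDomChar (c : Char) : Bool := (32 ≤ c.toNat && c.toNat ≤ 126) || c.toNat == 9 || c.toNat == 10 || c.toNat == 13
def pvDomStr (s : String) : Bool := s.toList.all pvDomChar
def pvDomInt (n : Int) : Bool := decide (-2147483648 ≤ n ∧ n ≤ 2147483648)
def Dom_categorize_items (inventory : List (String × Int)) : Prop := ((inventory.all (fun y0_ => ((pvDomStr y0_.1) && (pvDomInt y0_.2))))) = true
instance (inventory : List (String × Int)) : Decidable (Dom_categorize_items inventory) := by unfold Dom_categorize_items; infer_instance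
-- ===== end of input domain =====

-- B replaces A's single-pass if/elif/else accumulation into a pre-built nested dict by a dict
-- literal of three independent filtering comprehensions (one scan per band); objective: simpler.

-- ===== PORT A =====
-- the body of A's for-loop (if/elif/else on qty, storing into the matching inner dict)
def categorize_items_loopBody (cat : PySem.Dict String (PySem.Dict String Int))
    (p : String × Int) : PySem.Dict String (PySem.Dict String Int) :=
  if p.2 ≥ 10 then cat.modify "abundant" .empty (fun d => d.insert p.1 p.2)
  else if p.2 ≥ 5 then cat.modify "moderate" .empty (fun d => d.insert p.1 p.2)
  else cat.modify "scarce" .empty (fun d => d.insert p.1 p.2)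

def categorize_items (inventory : List (String × Int)) : List (String × List (String × Int)) :=
  let categories : PySem.Dict String (PySem.Dict String Int) :=
    PySem.Dict.mk [("abundant", .empty), ("moderate", .empty), ("scarce", .empty)]
  let categories := inventory.foldl categorize_items_loopBody categories
  categories.items.map (fun q => (q.1, q.2.items))

-- ===== PORT B =====
def categorize_items_alt (inventory : List (String × Int)) : List (String × List (String × Int)) :=
  [("abundant", inventory.filter (fun p => decide (p.2 ≥ 10))),
   ("moderate", inventory.filter (fun p => decide (5 ≤ p.2 ∧ p.2 < 10))),
   ("scarce", inventory.filter (fun p => decide (p.2 < 5)))]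

-- ===== PRECONDITION & SPEC =====
-- Pre_ excludes association lists with duplicate keys, which can never arise from a Python dict
-- argument (Python dict keys are unique); on them A's dict overwriting and B's filters differ.
def Pre_categorize_items (inventory : List (String × Int)) : Prop :=
  (inventory.map Prod.fst).Nodup
instance (inventory : List (String × Int)) : Decidable (Pre_categorize_items inventory) := by
  unfold Pre_categorize_items; infer_instance

def pvWitness_categorize_items : (List (String × Int)) := [("apple", 12), ("pear", 7), ("fig", 2)]

def Spec_categorize_items (inventory : List (String × Int)) (out : List (String × List (String × Int))) : Prop := out = categorize_items_alt inventory
instance (inventory : List (String × Int)) (out : List (String × List (String × Int))) : Decidable (Spec_categorize_items inventory out) := by unfold Spec_categorize_items; infer_instance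

-- ===== CLAIM (what is proved, stated in full; the proofs are below) =====
def Claim_equal_categorize_items : Prop := ∀ (inventory : List (String × Int)), Dom_categorize_items inventory → Pre_categorize_items inventory → Spec_categorize_items inventory (categorize_items inventory)

-- ===== LEMMAS AND PROOFS =====

lemma insert_fresh (l : List (String × Int)) (k : String) (v : Int)
    (h : k ∉ l.map Prod.fst) :
    (PySem.Dict.mk l).insert k v = PySem.Dict.mk (l ++ [(k, v)]) := by
  apply PySem.Dict.ext
  exact PySem.Dict.items_insert_of_not_contains _ _
    (by simpa [PySem.Dict.contains_eq_decide_mem_keys, PySem.Dict.keys_mk] using h)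

lemma loopBody_abundant (da dm ds : PySem.Dict String Int) (k : String) (v : Int)
    (h : v ≥ 10) :
    categorize_items_loopBody
      (PySem.Dict.mk [("abundant", da), ("moderate", dm), ("scarce", ds)]) (k, v)
    = PySem.Dict.mk [("abundant", da.insert k v), ("moderate", dm), ("scarce", ds)] := by
  unfold categorize_items_loopBody
  rw [if_pos h]
  rfl

lemma loopBody_moderate (da dm ds : PySem.Dict String Int) (k : String) (v : Int)
    (h1 : ¬ v ≥ 10) (h2 : v ≥ 5) :
    categorize_items_loopBody
      (PySem.Dict.mk [("abundant", da), ("moderate", dm), ("scarce", ds)]) (k, v)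
    = PySem.Dict.mk [("abundant", da), ("moderate", dm.insert k v), ("scarce", ds)] := by
  unfold categorize_items_loopBody
  rw [if_neg h1, if_pos h2]
  rfl

lemma loopBody_scarce (da dm ds : PySem.Dict String Int) (k : String) (v : Int)
    (h1 : ¬ v ≥ 10) (h2 : ¬ v ≥ 5) :
    categorize_items_loopBody
      (PySem.Dict.mk [("abundant", da), ("moderate", dm), ("scarce", ds)]) (k, v)
    = PySem.Dict.mk [("abundant", da), ("moderate", dm), ("scarce", ds.insert k v)] := by
  unfold categorize_items_loopBody
  rw [if_neg h1, if_neg h2]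
  rfl

lemma loop_eq (inv : List (String × Int)) (da dm ds : List (String × Int))
    (hnd : (inv.map Prod.fst).Nodup)
    (ha : ∀ p ∈ inv, p.1 ∉ da.map Prod.fst)
    (hm : ∀ p ∈ inv, p.1 ∉ dm.map Prod.fst)
    (hs : ∀ p ∈ inv, p.1 ∉ ds.map Prod.fst) :
    inv.foldl categorize_items_loopBody
      (PySem.Dict.mk [("abundant", PySem.Dict.mk da), ("moderate", PySem.Dict.mk dm),
        ("scarce", PySem.Dict.mk ds)])
    = PySem.Dict.mk
        [("abundant", PySem.Dict.mk (da ++ inv.filter (fun p => decide (p.2 ≥ 10)))),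
         ("moderate", PySem.Dict.mk (dm ++ inv.filter (fun p => decide (5 ≤ p.2 ∧ p.2 < 10)))),
         ("scarce", PySem.Dict.mk (ds ++ inv.filter (fun p => decide (p.2 < 5))))] := by
  induction inv generalizing da dm ds with
  | nil => simp
  | cons q rest ih =>
    obtain ⟨k, v⟩ := q
    simp only [List.map_cons, List.nodup_cons] at hnd
    obtain ⟨hk, hnd'⟩ := hnd
    have hka : k ∉ da.map Prod.fst := ha (k, v) (by simp)
    have hkm : k ∉ dm.map Prod.fst := hm (k, v) (by simp)
    have hks : k ∉ ds.map Prod.fst := hs (k, v) (by simp)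
    have push : ∀ (dl : List (String × Int)), (∀ p ∈ (k, v) :: rest, p.1 ∉ dl.map Prod.fst) →
        ∀ p ∈ rest, p.1 ∉ (dl ++ [(k, v)]).map Prod.fst := by
      intro dl hdl p hp
      simp only [List.map_append, List.mem_append, List.map_cons, List.map_nil,
        List.mem_cons, List.not_mem_nil, or_false]
      rintro (h | h)
      · exact hdl p (List.mem_cons_of_mem _ hp) h
      · exact hk (h ▸ List.mem_map_of_mem hp)
    have ha' : ∀ p ∈ rest, p.1 ∉ da.map Prod.fst := fun p hp => ha p (List.mem_cons_of_mem _ hp)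
    have hm' : ∀ p ∈ rest, p.1 ∉ dm.map Prod.fst := fun p hp => hm p (List.mem_cons_of_mem _ hp)
    have hs' : ∀ p ∈ rest, p.1 ∉ ds.map Prod.fst := fun p hp => hs p (List.mem_cons_of_mem _ hp)
    simp only [List.foldl_cons]
    by_cases h1 : v ≥ 10
    · rw [loopBody_abundant _ _ _ _ _ h1, insert_fresh _ _ _ hka,
        ih (da ++ [(k, v)]) dm ds hnd' (push da ha) hm' hs']
      have e2 : ¬ (5 ≤ v ∧ v < 10) := by omega
      have e3 : ¬ (v < 5) := by omega
      simp [h1, e2, e3]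
    · by_cases h2 : v ≥ 5
      · rw [loopBody_moderate _ _ _ _ _ h1 h2, insert_fresh _ _ _ hkm,
          ih da (dm ++ [(k, v)]) ds hnd' ha' (push dm hm) hs']
        have e2 : (5 ≤ v ∧ v < 10) := by omega
        have e3 : ¬ (v < 5) := by omega
        simp [h1, e2, e3]
      · rw [loopBody_scarce _ _ _ _ _ h1 h2, insert_fresh _ _ _ hks,
          ih da dm (ds ++ [(k, v)]) hnd' ha' hm' (push ds hs)]
        have e2 : ¬ (5 ≤ v ∧ v < 10) := by omega
        have e3 : (v < 5) := by omega
        simp [h1, h2, e3]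

-- ===== VERDICT (by name: the statement is the Claim_ definition above) =====
theorem categorize_items_spec : Claim_equal_categorize_items := by
  intro inventory _ hpre
  show _ = _
  have h0 : categorize_items inventory
      = (List.foldl categorize_items_loopBody
          (PySem.Dict.mk [("abundant", PySem.Dict.mk []), ("moderate", PySem.Dict.mk []),
            ("scarce", PySem.Dict.mk [])]) inventory).items.map (fun q => (q.1, q.2.items)) := rfl
  rw [h0, loop_eq inventory [] [] [] hpre (by simp) (by simp) (by simp)]
  rfl
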